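-- pv_equiv track=rewrite | github.com/gkhanh/EmbeddedVisionSystem-3S | Waveguide entrance1.1.py | group_midpoints_by_proximity
-- ===== SOURCE A (Python) =====
-- def group_midpoints_by_proximity(midpoints, max_distance=5):
--     """Group midpoints into clusters based on horizontal proximity."""
--
--     if not midpoints:
--         return []
--
--     # Sort midpoints by their x-coordinate
--     midpoints_sorted = sorted(midpoints, key=lambda point: point[0])
--
--     groups = []
--     current_group = [midpoints_sorted[0]]
--
--     # Iterate through the midpoints and group them by proximity
--     for i in range(1, len(midpoints_sorted)):
--         x_prev, y_prev = midpoints_sorted[i - 1]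
--         x_curr, y_curr = midpoints_sorted[i]
--
--         # If the horizontal distance is less than or equal to max_distance, group the points
--         if abs(x_curr - x_prev) <= max_distance:
--             current_group.append(midpoints_sorted[i])
--         else:
--             # If the distance is larger, close the current group and start a new one
--             groups.append(current_group)
--             current_group = [midpoints_sorted[i]]
--
--     # Add the last group
--     groups.append(current_group)
--
--     return groups
-- ===== SOURCE B (Python) =====
-- def group_midpoints_by_proximity(midpoints, max_distance=5):
--     """Group midpoints into clusters based on horizontal proximity.
--
--     Staged decomposition: sort, compute all break positions (indices where the
--     gap to the previous point exceeds max_distance) in one comprehension, then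
--     materialize the groups by slicing the sorted list between consecutive
--     boundaries.  No incremental current_group accumulator.
--     """
--     if not midpoints:
--         return []
--     pts = sorted(midpoints, key=lambda point: point[0])
--     breaks = [i for i in range(1, len(pts))
--               if abs(pts[i][0] - pts[i - 1][0]) > max_distance]
--     bounds = [0] + breaks + [len(pts)]
--     return [pts[a:b] for a, b in zip(bounds, bounds[1:])]
-- ===== Notes on version B (the rewrite author's own statement) =====
-- stated objective: alternative
-- what changed: B replaces A's single stateful loop (mutable current_group that is appended to and closed as it scans) by a staged pipeline: one comprehension computes every break index where the consecutive-gap exceeds max_distance, then the groups are materialized at once by slicing the sorted list between consecutive boundaries.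
import Mathlib
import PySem

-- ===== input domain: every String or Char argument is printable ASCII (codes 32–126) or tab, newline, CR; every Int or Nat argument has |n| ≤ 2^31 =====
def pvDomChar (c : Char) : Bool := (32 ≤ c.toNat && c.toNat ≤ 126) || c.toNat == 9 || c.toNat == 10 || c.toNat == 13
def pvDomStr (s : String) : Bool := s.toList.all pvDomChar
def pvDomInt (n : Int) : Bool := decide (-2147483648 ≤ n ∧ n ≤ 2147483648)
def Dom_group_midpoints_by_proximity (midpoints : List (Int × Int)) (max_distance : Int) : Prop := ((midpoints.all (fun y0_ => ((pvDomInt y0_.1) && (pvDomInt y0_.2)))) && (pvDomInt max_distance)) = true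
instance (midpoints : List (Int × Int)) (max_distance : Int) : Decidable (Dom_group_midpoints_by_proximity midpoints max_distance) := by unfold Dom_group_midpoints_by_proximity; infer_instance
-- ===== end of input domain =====

-- B replaces A's stateful scan (a mutable current_group appended to and closed
-- mid-loop) by a staged pipeline: compute all break indices first, then slice
-- the sorted list between consecutive boundaries; same cost (alternative).

-- ===== PORT A =====
def group_midpoints_by_proximity (midpoints : List (Int × Int)) (max_distance : Int) : List (List (Int × Int)) :=
  if midpoints = [] then []
  else
    let ms := PySem.List.sorted midpoints (fun point => point.1)
    let st := (PySem.List.pyRange 1 (ms.length : Int) 1).foldl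
      (fun (st : List (List (Int × Int)) × List (Int × Int)) i =>
        let prev := PySem.List.pyGetD ms (i - 1) (0, 0)   -- in range for every i of the range
        let curr := PySem.List.pyGetD ms i (0, 0)
        if |curr.1 - prev.1| ≤ max_distance then (st.1, st.2 ++ [curr])
        else (st.1 ++ [st.2], [curr]))
      ([], [PySem.List.pyGetD ms 0 (0, 0)])
    st.1 ++ [st.2]

-- ===== PORT B =====
def group_midpoints_by_proximity_alt (midpoints : List (Int × Int)) (max_distance : Int) : List (List (Int × Int)) :=
  if midpoints = [] then []
  else
    let pts := PySem.List.sorted midpoints (fun point => point.1)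
    let breaks := (PySem.List.pyRange 1 (pts.length : Int) 1).filter
      (fun i => decide (max_distance <
        |(PySem.List.pyGetD pts i (0, 0)).1 - (PySem.List.pyGetD pts (i - 1) (0, 0)).1|))
    let bounds := (0 : Int) :: breaks ++ [(pts.length : Int)]
    (bounds.zip bounds.tail).map (fun ab => PySem.List.slice pts (some ab.1) (some ab.2))

-- ===== PRECONDITION & SPEC =====
def Spec_group_midpoints_by_proximity (midpoints : List (Int × Int)) (max_distance : Int) (out : List (List (Int × Int))) : Prop := out = group_midpoints_by_proximity_alt midpoints max_distance
instance (midpoints : List (Int × Int)) (max_distance : Int) (out : List (List (Int × Int))) : Decidable (Spec_group_midpoints_by_proximity midpoints max_distance out) := by unfold Spec_group_midpoints_by_proximity; infer_instance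

-- ===== CLAIM (what is proved, stated in full; the proofs are below) =====
def Claim_equal_group_midpoints_by_proximity : Prop := ∀ (midpoints : List (Int × Int)) (max_distance : Int), Dom_group_midpoints_by_proximity midpoints max_distance → Spec_group_midpoints_by_proximity midpoints max_distance (group_midpoints_by_proximity midpoints max_distance)

-- ===== LEMMAS AND PROOFS =====

-- Common reference shape: the grouping as a structural recursion (foldr style).
def pvC (d : Int) : List (Int × Int) → List (List (Int × Int))
  | [] => []
  | p :: rest =>
    match pvC d rest with
    | [] => [[p]]
    | g :: gs =>
      if |(g.headD (0, 0)).1 - p.1| ≤ d then (p :: g) :: gs else [p] :: g :: gs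

lemma pvC_head (d : Int) (p : Int × Int) (l : List (Int × Int)) :
    ∃ t gs, pvC d (p :: l) = (p :: t) :: gs := by
  cases h : pvC d l with
  | nil => exact ⟨[], [], by rw [pvC, h]⟩
  | cons g gs =>
    by_cases hc : |(g.headD (0, 0)).1 - p.1| ≤ d
    · refine ⟨g, gs, ?_⟩
      rw [pvC, h]
      show (if |(g.headD (0, 0)).1 - p.1| ≤ d then (p :: g) :: gs else [p] :: g :: gs) = _
      rw [if_pos hc]
    · refine ⟨[], g :: gs, ?_⟩
      rw [pvC, h]
      show (if |(g.headD (0, 0)).1 - p.1| ≤ d then (p :: g) :: gs else [p] :: g :: gs) = _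
      rw [if_neg hc]

lemma pvC_cons_cons (d : Int) (prev q : Int × Int) (qs t' : List (Int × Int))
    (gs' : List (List (Int × Int))) (h' : pvC d (q :: qs) = (q :: t') :: gs') :
    pvC d (prev :: q :: qs)
      = if |q.1 - prev.1| ≤ d then (prev :: q :: t') :: gs'
        else [prev] :: (q :: t') :: gs' := by
  rw [pvC, h']
  show (if |((q :: t').headD (0, 0)).1 - prev.1| ≤ d then _ else _) = _
  simp

-- ---------- A side: A's loop as a structural recursion, then A = pvC ----------
def pvGo (d : Int) (st : List (List (Int × Int)) × List (Int × Int)) (prev : Int × Int) :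
    List (Int × Int) → List (List (Int × Int)) × List (Int × Int)
  | [] => st
  | q :: qs =>
    if |q.1 - prev.1| ≤ d then pvGo d (st.1, st.2 ++ [q]) q qs
    else pvGo d (st.1 ++ [st.2], [q]) q qs

lemma pvGo_eq_pvC (d : Int) :
    ∀ (rest : List (Int × Int)) (prev : Int × Int) (groups : List (List (Int × Int)))
      (cur t : List (Int × Int)) (gs : List (List (Int × Int))),
      pvC d (prev :: rest) = (prev :: t) :: gs →
      (pvGo d (groups, cur) prev rest).1 ++ [(pvGo d (groups, cur) prev rest).2]
        = groups ++ (cur ++ t) :: gs := by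
  intro rest
  induction rest with
  | nil =>
    intro prev groups cur t gs h
    simp [pvC] at h
    obtain ⟨ht, hgs⟩ := h
    simp [pvGo, ← ht, hgs]
  | cons q qs ih =>
    intro prev groups cur t gs h
    obtain ⟨t', gs', h'⟩ := pvC_head d q qs
    rw [pvC_cons_cons d prev q qs t' gs' h'] at h
    by_cases hc : |q.1 - prev.1| ≤ d
    · rw [if_pos hc] at h
      injection h with h1 h2
      injection h1 with _ h1t
      subst h1t; subst h2
      have hih := ih q groups (cur ++ [q]) t' gs' h'
      rw [pvGo, if_pos hc, hih]
      simp
    · rw [if_neg hc] at h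
      injection h with h1 h2
      injection h1 with _ h1t
      subst h1t; subst h2
      have hih := ih q (groups ++ [cur]) [q] t' gs' h'
      rw [pvGo, if_neg hc, hih]
      simp

lemma pvA_bridge (ms : List (Int × Int)) (d : Int) :
    ∀ (n k : Nat) (st : List (List (Int × Int)) × List (Int × Int))
      (_ : ms.length - (k + 1) = n) (hk : k < ms.length),
      (PySem.List.pyRange ((k : Int) + 1) (ms.length : Int) 1).foldl
        (fun (st : List (List (Int × Int)) × List (Int × Int)) i =>
          if |(PySem.List.pyGetD ms i (0, 0)).1 - (PySem.List.pyGetD ms (i - 1) (0, 0)).1| ≤ d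
          then (st.1, st.2 ++ [PySem.List.pyGetD ms i (0, 0)])
          else (st.1 ++ [st.2], [PySem.List.pyGetD ms i (0, 0)])) st
        = pvGo d st (ms[k]'hk) (ms.drop (k + 1)) := by
  intro n
  induction n with
  | zero =>
    intro k st hn hk
    rw [PySem.List.pyRange_one_eq_nil (by omega)]
    rw [List.drop_of_length_le (by omega)]
    rfl
  | succ n ih =>
    intro k st hn hk
    have hk1 : k + 1 < ms.length := by omega
    rw [PySem.List.pyRange_one_cons (by omega), List.foldl_cons]
    have e1 : ((k : Int) + 1) - 1 = ((k : Nat) : Int) := by ring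
    have e2 : ((k : Int) + 1) = (((k + 1 : Nat)) : Int) := by push_cast; ring
    have g1 : PySem.List.pyGetD ms ((k : Int) + 1 - 1) (0, 0) = ms[k] := by
      rw [e1, PySem.List.pyGetD_natCast, List.getD_eq_getElem _ _ hk]
    have g2 : PySem.List.pyGetD ms ((k : Int) + 1) (0, 0) = ms[k + 1] := by
      rw [e2, PySem.List.pyGetD_natCast, List.getD_eq_getElem _ _ hk1]
    have hdrop : ms.drop (k + 1) = ms[k + 1] :: ms.drop (k + 2) := by
      rw [List.drop_eq_getElem_cons hk1]
    rw [hdrop, pvGo]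
    simp only [g1, g2]
    by_cases hc : |(ms[k + 1]).1 - (ms[k]).1| ≤ d
    · rw [if_pos hc, if_pos hc]
      have h3 := ih (k + 1) (st.1, st.2 ++ [ms[k + 1]]) (by omega) hk1
      rw [← e2] at h3
      exact h3
    · rw [if_neg hc, if_neg hc]
      have h3 := ih (k + 1) (st.1 ++ [st.2], [ms[k + 1]]) (by omega) hk1
      rw [← e2] at h3
      exact h3

lemma pvA_whole (ms : List (Int × Int)) (d : Int) (m0 : Int × Int)
    (rest : List (Int × Int)) (hcons : ms = m0 :: rest) :
    (let st := (PySem.List.pyRange 1 (ms.length : Int) 1).foldl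
        (fun (st : List (List (Int × Int)) × List (Int × Int)) i =>
          if |(PySem.List.pyGetD ms i (0, 0)).1 - (PySem.List.pyGetD ms (i - 1) (0, 0)).1| ≤ d
          then (st.1, st.2 ++ [PySem.List.pyGetD ms i (0, 0)])
          else (st.1 ++ [st.2], [PySem.List.pyGetD ms i (0, 0)]))
        ([], [PySem.List.pyGetD ms 0 (0, 0)])
     st.1 ++ [st.2]) = pvC d ms := by
  subst hcons
  have hbridge := pvA_bridge (m0 :: rest) d rest.length 0
    ([], [PySem.List.pyGetD (m0 :: rest) 0 (0, 0)]) (by simp) (by simp)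
  have e0 : (((0 : Nat) : Int) + 1) = (1 : Int) := by norm_num
  rw [e0] at hbridge
  simp only [PySem.List.pyGetD_zero_cons] at hbridge ⊢
  rw [hbridge]
  simp only [List.getElem_cons_zero, List.drop_succ_cons, List.drop_zero]
  obtain ⟨t, gs, hC⟩ := pvC_head d m0 rest
  rw [pvGo_eq_pvC d rest m0 [] [m0] t gs hC, hC]
  simp

-- ---------- B side: Nat-level breaks and slices, then B = pvC ----------

-- Nat-level break predicate and break list (indices 1 .. len-1).
def pvP (d : Int) (ms : List (Int × Int)) (i : Nat) : Bool :=
  decide (d < |(ms.getD i (0, 0)).1 - (ms.getD (i - 1) (0, 0)).1|)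

def pvBreaks (d : Int) (ms : List (Int × Int)) : List Nat :=
  (List.range' 1 (ms.length - 1)).filter (pvP d ms)

-- Nat-level slicing between consecutive bounds.
def pvSlices (ms : List (Int × Int)) (bs : List Nat) : List (List (Int × Int)) :=
  (bs.zip bs.tail).map (fun ab => (ms.drop ab.1).take (ab.2 - ab.1))

lemma pvSlices_shift (p : Int × Int) (l : List (Int × Int)) (bs : List Nat) :
    pvSlices (p :: l) (bs.map (· + 1)) = pvSlices l bs := by
  unfold pvSlices
  rw [← List.map_tail, List.zip_map, List.map_map]
  refine List.map_congr_left ?_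
  intro ab _
  simp

lemma pvSlices_cons_zero (ms : List (Int × Int)) (b0 : Nat) (bs : List Nat) :
    pvSlices ms (0 :: b0 :: bs) = ms.take b0 :: pvSlices ms (b0 :: bs) := by
  unfold pvSlices
  simp

lemma pvBreaks_cons (d : Int) (p q : Int × Int) (qs : List (Int × Int)) :
    pvBreaks d (p :: q :: qs)
      = (if pvP d (p :: q :: qs) 1 then [1] else [])
        ++ (pvBreaks d (q :: qs)).map (· + 1) := by
  unfold pvBreaks
  have hlen : (p :: q :: qs).length - 1 = qs.length + 1 := by simp
  have hr2 : List.range' 2 qs.length = (List.range' 1 qs.length).map (· + 1) := by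
    simp [List.range'_eq_map_range, List.map_map]; omega
  rw [hlen, List.range'_succ, hr2, List.filter_cons]
  have hfm : ((List.range' 1 qs.length).map (· + 1)).filter (pvP d (p :: q :: qs))
      = ((List.range' 1 qs.length).filter (fun i => pvP d (p :: q :: qs) (i + 1))).map (· + 1) := by
    rw [List.filter_map]; rfl
  rw [hfm]
  have hcong : (List.range' 1 qs.length).filter (fun i => pvP d (p :: q :: qs) (i + 1))
      = (List.range' 1 qs.length).filter (pvP d (q :: qs)) := by
    refine List.filter_congr ?_
    intro i hi
    have h1 : 1 ≤ i := (List.mem_range'_1.mp hi).1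
    obtain ⟨j, rfl⟩ := Nat.exists_eq_add_of_le h1
    unfold pvP
    simp [Nat.add_comm 1 j]
  rw [hcong]
  have hlen2 : (q :: qs).length - 1 = qs.length := by simp
  rw [hlen2]
  split <;> simp

lemma pvP_one (d : Int) (p q : Int × Int) (qs : List (Int × Int)) :
    pvP d (p :: q :: qs) 1 = decide (d < |q.1 - p.1|) := by
  unfold pvP
  simp [List.getD]

lemma pvSlices_eq_pvC (d : Int) :
    ∀ (rest : List (Int × Int)) (p : Int × Int),
      pvSlices (p :: rest) (0 :: pvBreaks d (p :: rest) ++ [(p :: rest).length])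
        = pvC d (p :: rest) := by
  intro rest
  induction rest with
  | nil =>
    intro p
    simp [pvBreaks, pvSlices, pvC]
  | cons q qs ih =>
    intro p
    obtain ⟨t, gs, hC⟩ := pvC_head d q qs
    rw [pvBreaks_cons, pvP_one, pvC_cons_cons d p q qs t gs hC]
    by_cases hgap : |q.1 - p.1| ≤ d
    · -- no break after p: p joins the first group
      rw [if_neg (by simpa using hgap), if_pos hgap]
      obtain ⟨b0, bs'', hbs⟩ : ∃ b0 bs'',
          pvBreaks d (q :: qs) ++ [(q :: qs).length] = b0 :: bs'' := by
        cases h : pvBreaks d (q :: qs) with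
        | nil => exact ⟨(q :: qs).length, [], by simp⟩
        | cons a l => exact ⟨a, l ++ [(q :: qs).length], by simp⟩
      have hih := ih q
      rw [hC, show (0 : Nat) :: pvBreaks d (q :: qs) ++ [(q :: qs).length]
          = 0 :: (pvBreaks d (q :: qs) ++ [(q :: qs).length]) by simp, hbs,
        pvSlices_cons_zero] at hih
      have hg : (q :: qs).take b0 = q :: t := (List.cons_eq_cons.mp hih).1
      have hgs : pvSlices (q :: qs) (b0 :: bs'') = gs := (List.cons_eq_cons.mp hih).2
      have hb : (0 : Nat) :: ([] ++ (pvBreaks d (q :: qs)).map (· + 1)) ++ [(p :: q :: qs).length]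
          = 0 :: ((pvBreaks d (q :: qs) ++ [(q :: qs).length]).map (· + 1)) := by
        simp
      rw [hb, hbs, List.map_cons, pvSlices_cons_zero]
      have hsh := pvSlices_shift p (q :: qs) (b0 :: bs'')
      rw [List.map_cons] at hsh
      rw [hsh, hgs, List.take_succ_cons, hg]
    · -- break after p: [p] becomes its own first group
      rw [if_pos (by simpa using (not_le.mp hgap)), if_neg hgap]
      have hb2 : (0 : Nat) :: ([1] ++ (pvBreaks d (q :: qs)).map (· + 1)) ++ [(p :: q :: qs).length]
          = 0 :: (((0 : Nat) :: pvBreaks d (q :: qs) ++ [(q :: qs).length]).map (· + 1)) := by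
        simp
      rw [hb2]
      have hih := ih q
      rw [hC] at hih
      have hsh := pvSlices_shift p (q :: qs) ((0 : Nat) :: pvBreaks d (q :: qs) ++ [(q :: qs).length])
      rw [hih] at hsh
      rw [show (((0 : Nat) :: pvBreaks d (q :: qs) ++ [(q :: qs).length]).map (· + 1))
            = (0 + 1) :: ((pvBreaks d (q :: qs) ++ [(q :: qs).length]).map (· + 1)) by
          simp] at hsh ⊢
      rw [pvSlices_cons_zero, hsh]
      simp

-- pyRange 1 n 1 as a Nat range.
lemma pvPyRange_natCast (n : Nat) :
    PySem.List.pyRange 1 ((n : Nat) : Int) 1 = (List.range' 1 (n - 1)).map (Nat.cast) := by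
  induction n with
  | zero => rw [PySem.List.pyRange_one_eq_nil (by norm_num)]; simp
  | succ m ih =>
    rcases Nat.eq_zero_or_pos m with hm | hm
    · subst hm
      rw [show (((1 : Nat) : Int)) = (1 : Int) by norm_num,
        PySem.List.pyRange_one_eq_nil (by norm_num)]
      simp
    · have e : ((m + 1 : Nat) : Int) = ((m : Nat) : Int) + 1 := by push_cast; ring
      rw [e, PySem.List.pyRange_one_succ_right (by exact_mod_cast hm), ih]
      have hml : m - 1 + 1 = m := by omega
      rw [show (List.range' 1 (m + 1 - 1)) = List.range' 1 ((m - 1) + 1) by rw [hml]; simp,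
        List.range'_concat]
      simp
      omega

-- B's whole else-branch equals the Nat-level slices, hence pvC.
lemma pvB_whole (ms : List (Int × Int)) (d : Int) (m0 : Int × Int)
    (rest : List (Int × Int)) (hcons : ms = m0 :: rest) :
    (let breaks := (PySem.List.pyRange 1 (ms.length : Int) 1).filter
        (fun i => decide (d <
          |(PySem.List.pyGetD ms i (0, 0)).1 - (PySem.List.pyGetD ms (i - 1) (0, 0)).1|))
     let bounds := (0 : Int) :: breaks ++ [(ms.length : Int)]
     (bounds.zip bounds.tail).map (fun ab => PySem.List.slice ms (some ab.1) (some ab.2)))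
      = pvC d ms := by
  have hfilt : (PySem.List.pyRange 1 (ms.length : Int) 1).filter
        (fun i => decide (d <
          |(PySem.List.pyGetD ms i (0, 0)).1 - (PySem.List.pyGetD ms (i - 1) (0, 0)).1|))
      = (pvBreaks d ms).map (Nat.cast) := by
    rw [pvPyRange_natCast, List.filter_map]
    unfold pvBreaks
    congr 1
    refine List.filter_congr ?_
    intro i hi
    have h1 : 1 ≤ i := (List.mem_range'_1.mp hi).1
    have e1 : ((i : Nat) : Int) - 1 = ((i - 1 : Nat) : Int) := by omega
    unfold pvP
    simp only [Function.comp_apply, e1, PySem.List.pyGetD_natCast]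
  have hbounds : (0 : Int) :: (pvBreaks d ms).map (Nat.cast) ++ [(ms.length : Int)]
      = (((0 : Nat) :: pvBreaks d ms ++ [ms.length]).map (Nat.cast)) := by simp
  simp only [hfilt, hbounds]
  rw [← List.map_tail, List.zip_map, List.map_map]
  have hmaps : ((((0 : Nat) :: pvBreaks d ms ++ [ms.length]).zip
        ((0 : Nat) :: pvBreaks d ms ++ [ms.length]).tail).map
      ((fun ab => PySem.List.slice ms (some ab.1) (some ab.2)) ∘ Prod.map Nat.cast Nat.cast))
      = pvSlices ms ((0 : Nat) :: pvBreaks d ms ++ [ms.length]) := by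
    unfold pvSlices
    refine List.map_congr_left ?_
    intro ab _
    simp only [Function.comp_apply, Prod.map_fst, Prod.map_snd]
    exact PySem.List.slice_natCast ms ab.1 ab.2
  rw [hmaps]
  subst hcons
  exact pvSlices_eq_pvC d rest m0

-- ===== VERDICT (by name: the statement is the Claim_ definition above) =====
theorem group_midpoints_by_proximity_spec : Claim_equal_group_midpoints_by_proximity := by
  intro midpoints d _
  unfold Spec_group_midpoints_by_proximity
  by_cases hm : midpoints = []
  · subst hm; rfl
  · have hms : PySem.List.sorted midpoints (fun point => point.1) ≠ [] := by
      simpa [PySem.List.sorted_eq_nil_iff] using hm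
    obtain ⟨m0, rest, hcons⟩ := List.exists_cons_of_ne_nil hms
    unfold group_midpoints_by_proximity group_midpoints_by_proximity_alt
    rw [if_neg hm, if_neg hm]
    rw [pvA_whole _ d m0 rest hcons, pvB_whole _ d m0 rest hcons]
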